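-- pv_equiv track=rewrite | github.com/RobinPaulKoch/Data-Descent | root_node.py | recursive_root_finder
-- ===== SOURCE A (Python) =====
-- def recursive_root_finder(l, edge):
--     #Define random starting point
--
--     target_l = []
--     for v1, v2 in l:
--         target_l.append(v2)
--
--     if edge[0] in target_l:
--         predecessors_i = [i for i, e in enumerate(target_l) if e == edge[0]]
--         for i in predecessors_i:
--             return recursive_root_finder(l, l[i])
--     else:
--         root = edge[0]
--         return root
-- ===== SOURCE B (Python) =====
-- def recursive_root_finder(l, edge):
--     # Iterative chain walk: follow the first edge whose target equals the
--     # current node until no predecessor edge exists, then return that node.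
--     cur = edge[0]
--     while True:
--         nxt = next((v1 for v1, v2 in l if v2 == cur), None)
--         if nxt is None:
--             return cur
--         cur = nxt
-- ===== Notes on version B (the rewrite author's own statement) =====
-- stated objective: simpler
-- what changed: Replaces the recursion that rebuilds the whole target list and an enumerate-filter index pass at every level by a plain iterative walk that finds the first predecessor edge directly with next(); Pre_ excludes inputs whose predecessor chain cycles, where A raises RecursionError and B loops.
import Mathlib
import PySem

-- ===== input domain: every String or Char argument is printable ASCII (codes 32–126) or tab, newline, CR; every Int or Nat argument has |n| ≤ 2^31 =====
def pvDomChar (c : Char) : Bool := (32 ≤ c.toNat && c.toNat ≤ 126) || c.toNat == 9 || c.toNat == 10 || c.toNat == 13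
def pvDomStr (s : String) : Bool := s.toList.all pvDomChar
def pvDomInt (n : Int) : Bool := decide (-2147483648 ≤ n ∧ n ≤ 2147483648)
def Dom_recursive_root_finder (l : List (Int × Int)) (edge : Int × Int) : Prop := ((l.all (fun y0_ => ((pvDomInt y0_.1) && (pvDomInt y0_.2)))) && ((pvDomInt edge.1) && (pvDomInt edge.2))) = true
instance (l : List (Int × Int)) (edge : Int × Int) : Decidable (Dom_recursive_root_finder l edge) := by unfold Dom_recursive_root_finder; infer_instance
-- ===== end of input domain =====

-- B replaces A's recursion (which rebuilds the target list and an enumerate/filter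
-- index pass at every level) by a plain iterative chain walk using the first
-- matching predecessor edge; same return value on every input where A returns.


-- ===== PORT A =====
-- A is unboundedly recursive (it raises RecursionError on a cyclic chain); the
-- port carries fuel l.length + 1, which suffices for every terminating run of A
-- (a terminating chain visits distinct nodes, hence makes ≤ l.length steps);
-- Pre_ below excludes exactly the non-terminating inputs, so the fuel-out
-- branches are never reached under Pre_.
def recursive_root_finder_aux (l : List (Int × Int)) : Nat → (Int × Int) → Int
  | 0, edge => edge.1
  | fuel + 1, edge =>
    let target_l := l.foldl (fun acc p => acc ++ [p.2]) []
    if edge.1 ∈ target_l then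
      let predecessors_i :=
        ((PySem.List.enumerate target_l).filter (fun q => q.2 == edge.1)).map (fun q => q.1)
      match predecessors_i with
      | i :: _ =>
        match PySem.List.pyGet? l i with
        | some e => recursive_root_finder_aux l fuel e
        | none => edge.1      -- unreachable: i is an in-range index of l
      | [] => edge.1          -- unreachable while the membership test holds
    else
      edge.1

def recursive_root_finder (l : List (Int × Int)) (edge : Int × Int) : Int :=
  recursive_root_finder_aux l (l.length + 1) edge

-- ===== PORT B =====
-- Source B's while-True loop, with the same fuel bound (B's loop also runs forever
-- exactly on the inputs Pre_ excludes).
def recursive_root_finder_alt_aux (l : List (Int × Int)) : Nat → Int → Int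
  | 0, cur => cur
  | fuel + 1, cur =>
    match l.find? (fun p => p.2 == cur) with
    | none => cur
    | some p => recursive_root_finder_alt_aux l fuel p.1

def recursive_root_finder_alt (l : List (Int × Int)) (edge : Int × Int) : Int :=
  recursive_root_finder_alt_aux l (l.length + 1) edge.1

-- ===== PRECONDITION & SPEC =====
-- one step of the predecessor chain: the source of the first edge whose target is x
def pvNext (l : List (Int × Int)) (x : Int) : Int :=
  match l.find? (fun p => p.2 == x) with
  | some p => p.1
  | none => x

-- Pre_ excludes exactly the inputs whose predecessor chain from edge[0] never
-- leaves the target set (a cycle): there A raises RecursionError and B loops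
-- forever.  Every terminating chain escapes within l.length steps.
def Pre_recursive_root_finder (l : List (Int × Int)) (edge : Int × Int) : Prop :=
  ∃ k ≤ l.length, (pvNext l)^[k] edge.1 ∉ l.map Prod.snd
instance (l : List (Int × Int)) (edge : Int × Int) : Decidable (Pre_recursive_root_finder l edge) := by
  unfold Pre_recursive_root_finder; infer_instance

def pvWitness_recursive_root_finder : (List (Int × Int)) × (Int × Int) :=
  ([(1, 2), (2, 3)], (3, 9))

def Spec_recursive_root_finder (l : List (Int × Int)) (edge : Int × Int) (out : Int) : Prop := out = recursive_root_finder_alt l edge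
instance (l : List (Int × Int)) (edge : Int × Int) (out : Int) : Decidable (Spec_recursive_root_finder l edge out) := by unfold Spec_recursive_root_finder; infer_instance

-- ===== CLAIM (what is proved, stated in full; the proofs are below) =====
def Claim_equal_recursive_root_finder : Prop := ∀ (l : List (Int × Int)) (edge : Int × Int), Dom_recursive_root_finder l edge → Pre_recursive_root_finder l edge → Spec_recursive_root_finder l edge (recursive_root_finder l edge)

-- ===== LEMMAS AND PROOFS =====

-- enumerate with a shifted start
lemma enumerate_shift {α : Type} (xs : List α) (s : Int) :
    PySem.List.enumerate xs (s + 1) = (PySem.List.enumerate xs s).map (fun p => (p.1 + 1, p.2)) := by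
  induction xs generalizing s with
  | nil => simp [PySem.List.enumerate_nil]
  | cons x xs ih => simp [PySem.List.enumerate_cons, ih]

-- A's first-predecessor step computes exactly l.find? (·.2 == x)
lemma stepA_eq_find? (l : List (Int × Int)) (x : Int) :
    (match (((PySem.List.enumerate (l.map Prod.snd)).filter (fun q => q.2 == x)).map (fun q => q.1)) with
      | [] => (none : Option (Int × Int))
      | i :: _ => PySem.List.pyGet? l i) = l.find? (fun p => p.2 == x) := by
  induction l with
  | nil => simp [PySem.List.enumerate_nil]
  | cons y l ih =>
    by_cases h : y.2 = x
    · simp [PySem.List.enumerate_cons, h, List.find?]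
    · have hb : (y.2 == x) = false := by simp [h]
      simp only [List.map_cons, PySem.List.enumerate_cons, List.filter_cons, hb,
        Bool.false_eq_true, if_false, List.find?, zero_add]
      rw [show (1 : Int) = 0 + 1 from rfl, enumerate_shift]
      rw [List.filter_map, List.map_map]
      simp only [Function.comp_def]
      rcases hf : (PySem.List.enumerate (l.map Prod.snd) 0).filter (fun q => q.2 == x) with _ | ⟨q, rest⟩
      · rw [hf] at ih ⊢
        simpa using ih
      · have hq : q ∈ (PySem.List.enumerate (l.map Prod.snd) 0).filter (fun q => q.2 == x) := by
          rw [hf]; exact List.mem_cons_self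
        have hq' : q ∈ PySem.List.enumerate (l.map Prod.snd) 0 := (List.mem_filter.mp hq).1
        have hq0 : 0 ≤ q.1 := by
          rcases (PySem.List.mem_enumerate_iff _ _ _).mp hq' with ⟨k, hk, hqe⟩
          simp [hqe]
        rw [hf] at ih ⊢
        simp only [List.map_cons] at ih ⊢
        have hstep : PySem.List.pyGet? (y :: l) (q.1 + 1) = PySem.List.pyGet? l q.1 := by
          rcases Int.eq_ofNat_of_zero_le hq0 with ⟨n, hn⟩
          rw [hn]; exact PySem.List.pyGet?_cons_succ y l n
        rw [hstep]; exact ih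

-- the membership test of A agrees with find? being successful
lemma mem_map_snd_iff_find? (l : List (Int × Int)) (x : Int) :
    x ∈ l.map Prod.snd ↔ (l.find? (fun p => p.2 == x)).isSome := by
  constructor
  · intro hx
    rcases List.mem_map.mp hx with ⟨p, hp, hpx⟩
    exact List.find?_isSome.mpr ⟨p, hp, by simp only [hpx, beq_self_eq_true]⟩
  · intro h
    rcases Option.isSome_iff_exists.mp h with ⟨p, hp⟩
    have hmem := List.mem_of_find?_eq_some hp
    have hpx : p.2 = x := by simpa using List.find?_some hp
    exact List.mem_map.mpr ⟨p, hmem, hpx⟩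

-- the two fueled loops agree step for step (for EVERY fuel: they also fuel out alike)
lemma aux_eq (l : List (Int × Int)) (fuel : Nat) (edge : Int × Int) :
    recursive_root_finder_aux l fuel edge = recursive_root_finder_alt_aux l fuel edge.1 := by
  induction fuel generalizing edge with
  | zero => rfl
  | succ fuel ih =>
    rw [recursive_root_finder_aux, recursive_root_finder_alt_aux]
    rw [PySem.List.foldl_append_singleton_eq_map]
    simp only [List.nil_append]
    rcases hf : l.find? (fun p => p.2 == edge.1) with _ | p
    · have hmem : edge.1 ∉ l.map Prod.snd := by
        rw [mem_map_snd_iff_find?, hf]; simp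
      rw [if_neg hmem, hf]
    · have hmem : edge.1 ∈ l.map Prod.snd := by
        rw [mem_map_snd_iff_find?, hf]; simp
      rw [if_pos hmem]
      have hs := stepA_eq_find? l edge.1
      rw [hf] at hs
      rcases hl : (((PySem.List.enumerate (l.map Prod.snd)).filter (fun q => q.2 == edge.1)).map (fun q => q.1)) with _ | ⟨i, rest⟩
      · rw [hl] at hs; exact absurd hs (by simp)
      · rw [hl] at hs
        simp only at hs
        rw [hf, hl]
        simp only [hs]
        exact ih p

-- ===== VERDICT (by name: the statement is the Claim_ definition above) =====
theorem recursive_root_finder_spec : Claim_equal_recursive_root_finder := by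
  intro l edge _ _
  unfold Spec_recursive_root_finder recursive_root_finder recursive_root_finder_alt
  exact aux_eq l (l.length + 1) edge
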